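-- pv_equiv track=rewrite | github.com/xiaol/Autoresearch_ideas | rwkv-mobile/converter/rwkv-coreml/rwkv_src/rwkv_modeling.py | _compute_chunk_boundaries
-- ===== SOURCE A (Python) =====
-- def _compute_chunk_boundaries(n_layer, chunks):
--     assert chunks > 0, "chunks must be >= 1"
--     base_layers = n_layer // chunks
--     extra_layers = n_layer % chunks
--     boundaries = []
--     for i in range(chunks):
--         if i < extra_layers:
--             layers_in_chunk = base_layers + 1
--             layer_begin = i * layers_in_chunk
--         else:
--             layers_in_chunk = base_layers
--             layer_begin = extra_layers * (base_layers + 1) + (i - extra_layers) * base_layers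
--         layer_end = min(n_layer, layer_begin + layers_in_chunk)
--         boundaries.append((layer_begin, layer_end))
--     return boundaries
-- ===== SOURCE B (Python) =====
-- def _compute_chunk_boundaries(n_layer, chunks):
--     assert chunks > 0, "chunks must be >= 1"
--     base_layers = n_layer // chunks
--     extra_layers = n_layer % chunks
--     boundaries = []
--     begin = 0
--     for i in range(chunks):
--         size = base_layers + (1 if i < extra_layers else 0)
--         boundaries.append((begin, min(n_layer, begin + size)))
--         begin += size
--     return boundaries
-- ===== Notes on version B (the rewrite author's own statement) =====
-- stated objective: simpler
-- what changed: B threads a running cursor 'begin' advanced by each chunk's size instead of recomputing every chunk's start with A's two-branch closed-form formula.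
import Mathlib
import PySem

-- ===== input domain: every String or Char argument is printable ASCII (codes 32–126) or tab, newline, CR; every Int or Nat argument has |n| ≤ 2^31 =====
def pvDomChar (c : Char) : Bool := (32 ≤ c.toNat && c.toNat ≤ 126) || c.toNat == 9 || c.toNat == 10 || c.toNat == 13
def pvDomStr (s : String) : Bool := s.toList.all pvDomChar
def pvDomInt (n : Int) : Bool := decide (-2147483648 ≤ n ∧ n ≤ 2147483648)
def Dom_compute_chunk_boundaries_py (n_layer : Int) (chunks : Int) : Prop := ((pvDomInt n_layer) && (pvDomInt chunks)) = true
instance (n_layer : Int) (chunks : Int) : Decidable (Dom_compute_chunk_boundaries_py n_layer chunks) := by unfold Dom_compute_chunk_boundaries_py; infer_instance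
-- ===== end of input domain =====

-- B replaces A's per-index closed-form start formula with a running cursor advanced by each chunk's size (simpler decomposition, same O(chunks) cost).

-- ===== PORT A =====
def compute_chunk_boundaries_py (n_layer : Int) (chunks : Int) : List (Int × Int) :=
  -- 'assert chunks > 0' raises AssertionError for chunks ≤ 0: excluded by Pre_ below
  let base_layers := PySem.Int.floordiv n_layer chunks
  let extra_layers := PySem.Int.mod n_layer chunks
  (PySem.List.pyRange 0 chunks 1).foldl (fun boundaries i =>
    let p :=
      if i < extra_layers then
        let layers_in_chunk := base_layers + 1
        (layers_in_chunk, i * layers_in_chunk)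
      else
        (base_layers, extra_layers * (base_layers + 1) + (i - extra_layers) * base_layers)
    boundaries ++ [(p.2, min n_layer (p.2 + p.1))]) []

-- ===== PORT B =====
def compute_chunk_boundaries_py_alt (n_layer : Int) (chunks : Int) : List (Int × Int) :=
  let base_layers := PySem.Int.floordiv n_layer chunks
  let extra_layers := PySem.Int.mod n_layer chunks
  ((PySem.List.pyRange 0 chunks 1).foldl (fun st i =>
    let size := base_layers + (if i < extra_layers then 1 else 0)
    (st.1 ++ [(st.2, min n_layer (st.2 + size))], st.2 + size)) ([], 0)).1

-- ===== PRECONDITION & SPEC =====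
-- Pre_ excludes exactly chunks ≤ 0, where A's assert raises AssertionError.
def Pre_compute_chunk_boundaries_py (n_layer : Int) (chunks : Int) : Prop := 0 < chunks
instance (n_layer : Int) (chunks : Int) : Decidable (Pre_compute_chunk_boundaries_py n_layer chunks) := by unfold Pre_compute_chunk_boundaries_py; infer_instance
def pvWitness_compute_chunk_boundaries_py : Int × Int := (7, 3)

def Spec_compute_chunk_boundaries_py (n_layer : Int) (chunks : Int) (out : List (Int × Int)) : Prop := out = compute_chunk_boundaries_py_alt n_layer chunks
instance (n_layer : Int) (chunks : Int) (out : List (Int × Int)) : Decidable (Spec_compute_chunk_boundaries_py n_layer chunks out) := by unfold Spec_compute_chunk_boundaries_py; infer_instance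

-- ===== CLAIM (what is proved, stated in full; the proofs are below) =====
def Claim_equal_compute_chunk_boundaries_py : Prop := ∀ (n_layer : Int) (chunks : Int), Dom_compute_chunk_boundaries_py n_layer chunks → Pre_compute_chunk_boundaries_py n_layer chunks → Spec_compute_chunk_boundaries_py n_layer chunks (compute_chunk_boundaries_py n_layer chunks)

-- ===== LEMMAS AND PROOFS =====

-- A's closed-form start of chunk i (the value A's two branches compute).
def pvBeg (base extra i : Int) : Int :=
  if i < extra then i * (base + 1) else extra * (base + 1) + (i - extra) * base

lemma pvBeg_zero (base extra : Int) (hx : 0 ≤ extra) : pvBeg base extra 0 = 0 := by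
  unfold pvBeg; split_ifs <;> nlinarith

lemma pvBeg_succ (base extra i : Int) (_hi : 0 ≤ i) :
    pvBeg base extra (i + 1) = pvBeg base extra i + (base + (if i < extra then 1 else 0)) := by
  unfold pvBeg
  rcases lt_trichotomy (i + 1) extra with h | h | h <;> split_ifs <;> ring_nf <;> omega

-- Loop invariant: A's fold and B's fold agree when B's cursor equals A's closed-form start.
lemma pvLoop_eq (n base extra chunks : Int) :
    ∀ (m : Nat) (j : Int) (acc : List (Int × Int)), 0 ≤ j → chunks = j + (m : Int) →
    (PySem.List.pyRange j chunks 1).foldl (fun boundaries i =>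
      let p :=
        if i < extra then
          let layers_in_chunk := base + 1
          (layers_in_chunk, i * layers_in_chunk)
        else
          (base, extra * (base + 1) + (i - extra) * base)
      boundaries ++ [(p.2, min n (p.2 + p.1))]) acc
    = ((PySem.List.pyRange j chunks 1).foldl (fun st i =>
        let size := base + (if i < extra then 1 else 0)
        (st.1 ++ [(st.2, min n (st.2 + size))], st.2 + size)) (acc, pvBeg base extra j)).1 := by
  intro m
  induction m with
  | zero =>
    intro j acc _ hc
    have : ¬ j < chunks := by omega
    simp [PySem.List.pyRange, this]
  | succ k ih =>
    intro j acc hj hc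
    have hjc : j < chunks := by omega
    rw [PySem.List.pyRange_one_cons hjc]
    simp only [List.foldl_cons]
    have hbeg : ∀ i, (if i < extra then ((base + 1), i * (base + 1))
        else (base, extra * (base + 1) + (i - extra) * base)).2 = pvBeg base extra i := by
      intro i; unfold pvBeg; split_ifs <;> rfl
    have hsz : ∀ i, (if i < extra then ((base + 1), i * (base + 1))
        else (base, extra * (base + 1) + (i - extra) * base)).1
        = base + (if i < extra then 1 else 0) := by
      intro i; split_ifs <;> ring
    rw [show (acc ++ [((if j < extra then ((base + 1), j * (base + 1))
        else (base, extra * (base + 1) + (j - extra) * base)).2,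
        min n ((if j < extra then ((base + 1), j * (base + 1))
        else (base, extra * (base + 1) + (j - extra) * base)).2
          + (if j < extra then ((base + 1), j * (base + 1))
        else (base, extra * (base + 1) + (j - extra) * base)).1))])
      = acc ++ [(pvBeg base extra j,
          min n (pvBeg base extra j + (base + (if j < extra then 1 else 0))))] by
        rw [hbeg, hsz]]
    rw [show pvBeg base extra j + (base + if j < extra then 1 else 0)
        = pvBeg base extra (j + 1) from (pvBeg_succ base extra j hj).symm]
    exact ih (j + 1) _ (by omega) (by omega)

-- ===== VERDICT (by name: the statement is the Claim_ definition above) =====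
theorem compute_chunk_boundaries_py_spec : Claim_equal_compute_chunk_boundaries_py := by
  intro n_layer chunks _ hpre
  unfold Pre_compute_chunk_boundaries_py at hpre
  unfold Spec_compute_chunk_boundaries_py compute_chunk_boundaries_py compute_chunk_boundaries_py_alt
  have hx : 0 ≤ PySem.Int.mod n_layer chunks := PySem.Int.mod_nonneg (a := n_layer) hpre
  have h := pvLoop_eq n_layer (PySem.Int.floordiv n_layer chunks)
    (PySem.Int.mod n_layer chunks) chunks chunks.toNat 0 [] le_rfl (by omega)
  rw [pvBeg_zero _ _ hx] at h
  simpa using h
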